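-- pv_equiv track=rewrite | github.com/Melodiz/dailycode | Algorithms/some_intern_contests/tinkoff_spring/task4/testutil.py | solution
-- ===== SOURCE A (Python) =====
-- from math import isqrt
--
-- def sieve_eratosthenes(n):
--     if n < 2:
--         return []
--     sieve = [True] * (n + 1)
--     sieve[0] = sieve[1] = False
--     for start in range(3, isqrt(n) + 1, 2):
--         if sieve[start]:
--             for multiple in range(start*start, n + 1, start*2):
--                 sieve[multiple] = False
--     return [2] + [num for num in range(3, n + 1, 2) if sieve[num]]
--
-- def solution(L, R):
--     primes = sieve_eratosthenes(isqrt(R)+1)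
--     primes_set = set(primes[1:])
--     counter = 0
--     for p in primes:
--         q = 2
--         num = pow(p, q-1)
--         while num <= R:
--             if num >= L and q in primes_set:
--                 counter += 1
--             num *= p
--             q += 1
--     return counter
-- ===== SOURCE B (Python) =====
-- from math import isqrt
--
-- def sieve_eratosthenes(n):
--     if n < 2:
--         return []
--     sieve = [True] * (n + 1)
--     sieve[0] = sieve[1] = False
--     for start in range(3, isqrt(n) + 1, 2):
--         if sieve[start]:
--             for multiple in range(start*start, n + 1, start*2):
--                 sieve[multiple] = False
--     return [2] + [num for num in range(3, n + 1, 2) if sieve[num]]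
--
-- def solution(L, R):
--     # exponent-major: for each odd prime exponent-index q, count prime bases p
--     # with L <= p**(q-1) <= R, breaking early since the sieve list is ascending
--     primes = sieve_eratosthenes(isqrt(R) + 1)
--     count = 0
--     for q in primes[1:]:
--         e = q - 1
--         for p in primes:
--             v = p ** e
--             if v > R:
--                 break
--             if v >= L:
--                 count += 1
--     return count
-- ===== Notes on version B (the rewrite author's own statement) =====
-- stated objective: alternative
-- what changed: B inverts the loop nesting: instead of A's base-major scan (per prime base, an incremental while over exponents with a hash-set membership test on the exponent index), B is exponent-major: for each odd prime q from the sieve it counts prime bases p with L <= p**(q-1) <= R by direct exponentiation, breaking early on the ascending sieve list; the set and the running product disappear.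
import Mathlib
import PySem

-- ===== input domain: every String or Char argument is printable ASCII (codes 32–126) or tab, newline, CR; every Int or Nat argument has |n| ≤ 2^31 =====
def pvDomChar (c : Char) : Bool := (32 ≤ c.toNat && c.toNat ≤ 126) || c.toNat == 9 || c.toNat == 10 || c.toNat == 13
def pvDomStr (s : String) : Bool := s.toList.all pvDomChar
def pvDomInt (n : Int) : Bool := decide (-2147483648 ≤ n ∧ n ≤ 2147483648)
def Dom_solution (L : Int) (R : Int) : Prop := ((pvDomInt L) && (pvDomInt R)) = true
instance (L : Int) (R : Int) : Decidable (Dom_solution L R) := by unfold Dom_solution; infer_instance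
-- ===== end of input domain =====

-- B replaces A's base-major while-loop/prime-set counting by an exponent-major count with early break on the ascending sieve list (alternative decomposition, same cost).

-- ===== PORT A =====

-- math.isqrt n — exact for 0 ≤ n (Pre_ keeps R ≥ 0, so every call site gets a nonnegative argument)
def isqrtI (n : Int) : Int := (Nat.sqrt n.toNat : Int)

-- sieve_eratosthenes, transliterated; sieve[i] = v / sieve[i] via pySetD/pyGetD (indices are always in range here)
def sieve_eratosthenes (n : Int) : List Int :=
  if n < 2 then []
  else
    let s0 : List Bool := List.replicate (n + 1).toNat true
    let s1 := PySem.List.pySetD (PySem.List.pySetD s0 0 false) 1 false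
    let s2 := (PySem.List.pyRange 3 (isqrtI n + 1) 2).foldl
      (fun s start =>
        if PySem.List.pyGetD s start false then
          (PySem.List.pyRange (start * start) (n + 1) (start * 2)).foldl
            (fun s' m => PySem.List.pySetD s' m false) s
        else s) s1
    2 :: (PySem.List.pyRange 3 (n + 1) 2).filter (fun num => PySem.List.pyGetD s2 num false)

-- A's inner while loop (q, num, counter threaded). Fuel only makes it total: num starts at p ≥ 2
-- and is multiplied by p ≥ 2 each pass, so inside Dom (R ≤ 2^31) the while always exits within 64 passes.
def innerA (L R p : Int) (pset : PySem.Set Int) : Nat → Int → Int → Int → Int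
  | 0, _, _, c => c
  | f + 1, q, num, c =>
    if num ≤ R then
      innerA L R p pset f (q + 1) (num * p) (if L ≤ num ∧ pset.contains q then c + 1 else c)
    else c

def solution (L : Int) (R : Int) : Int :=
  let primes := sieve_eratosthenes (isqrtI R + 1)
  let primes_set := PySem.Set.ofList (PySem.List.slice primes (some 1) none)
  primes.foldl (fun c p => innerA L R p primes_set 64 2 p c) 0

-- ===== PORT B =====

-- Source B's inner 'for p in primes: v = p ** e; if v > R: break; if v >= L: count += 1'
-- (e = q - 1 ≥ 2 for every q the outer loop supplies, so p ** e is the integer power p ^ e.toNat)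
def innerB (L R e : Int) : List Int → Int → Int
  | [], c => c
  | p :: rest, c =>
    let v := p ^ e.toNat
    if R < v then c
    else innerB L R e rest (if L ≤ v then c + 1 else c)

def solution_alt (L : Int) (R : Int) : Int :=
  let primes := sieve_eratosthenes (isqrtI R + 1)
  (PySem.List.slice primes (some 1) none).foldl (fun c q => innerB L R (q - 1) primes c) 0

-- ===== PRECONDITION & SPEC =====
-- Python's math.isqrt raises ValueError for a negative argument, so A (and B alike) raise whenever R < 0.
def Pre_solution (L : Int) (R : Int) : Prop := 0 ≤ R
instance (L : Int) (R : Int) : Decidable (Pre_solution L R) := by unfold Pre_solution; infer_instance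
def pvWitness_solution : Int × Int := (1, 10)

def Spec_solution (L : Int) (R : Int) (out : Int) : Prop := out = solution_alt L R
instance (L : Int) (R : Int) (out : Int) : Decidable (Spec_solution L R out) := by unfold Spec_solution; infer_instance

-- ===== CLAIM (what is proved, stated in full; the proofs are below) =====
def Claim_equal_solution : Prop := ∀ (L : Int) (R : Int), Dom_solution L R → Pre_solution L R → Spec_solution L R (solution L R)

-- ===== LEMMAS AND PROOFS =====

-- elements of a step-2 range are bounded below by the start
theorem pyRange_two_mem (a b x : Int) (h : x ∈ PySem.List.pyRange a b 2) : a ≤ x := by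
  have := (PySem.List.mem_pyRange_iff_of_pos (a := a) (b := b) (s := 2) (by norm_num) x).mp h
  omega

-- a step-2 range is strictly increasing
theorem pyRange_two_pairwise (a b : Int) : (PySem.List.pyRange a b 2).Pairwise (· < ·) := by
  rw [PySem.List.pyRange_of_pos a b (by norm_num)]
  refine List.Pairwise.map (R := fun (i j : Nat) => i < j) _ ?_ List.pairwise_lt_range
  intro i j hij
  omega

-- every element of the sieve's output is ≥ 2
theorem sieve_mem_two_le (n : Int) : ∀ p ∈ sieve_eratosthenes n, 2 ≤ p := by
  intro p hp
  unfold sieve_eratosthenes at hp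
  split at hp
  · simp at hp
  · simp only [List.mem_cons, List.mem_filter] at hp
    rcases hp with h | ⟨h, -⟩
    · omega
    · have := pyRange_two_mem 3 (n + 1) p h
      omega

-- every element after the leading 2 is ≥ 3
theorem sieve_tail_three_le (n : Int) : ∀ q ∈ (sieve_eratosthenes n).tail, 3 ≤ q := by
  intro q hq
  unfold sieve_eratosthenes at hq
  split at hq
  · simp at hq
  · simp only [List.tail_cons, List.mem_filter] at hq
    exact pyRange_two_mem 3 (n + 1) q hq.1

-- the sieve's output is strictly increasing
theorem sieve_pairwise (n : Int) : (sieve_eratosthenes n).Pairwise (· < ·) := by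
  unfold sieve_eratosthenes
  split
  · simp
  · refine List.pairwise_cons.mpr ⟨?_, ?_⟩
    · intro x hx
      have := pyRange_two_mem 3 (n + 1) x (List.mem_filter.mp hx).1
      omega
    · exact (pyRange_two_pairwise 3 (n + 1)).filter _

-- A's while loop counts the exponent indices i < fuel with num·p^i ∈ [L,R] and q+i in the set
theorem innerA_eq (L R p : Int) (t : List Int) (hp : 2 ≤ p) :
    ∀ (f : Nat) (q num c : Int), 1 ≤ num → R < num * 2 ^ f →
      innerA L R p (PySem.Set.ofList t) f q num c =
        c + ((List.range f).countP
          (fun (i : Nat) => decide (num * p ^ i ≤ R ∧ L ≤ num * p ^ i ∧ (q + (i : Int)) ∈ t)) : Int) := by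
  intro f
  induction f with
  | zero => intro q num c h1 hf; simp [innerA]
  | succ f ih =>
    intro q num c h1 hf
    rw [innerA]
    by_cases hle : num ≤ R
    · rw [if_pos hle]
      have h1' : 1 ≤ num * p := by nlinarith
      have hf' : R < num * p * 2 ^ f := by
        have h2f : (0:Int) < 2 ^ f := by positivity
        have : num * 2 ^ (f + 1) ≤ num * p * 2 ^ f := by
          rw [pow_succ]
          nlinarith [mul_nonneg (mul_nonneg (by omega : (0:Int) ≤ num) h2f.le) (by omega : (0:Int) ≤ p - 2)]
        omega
      rw [ih (q + 1) (num * p) _ h1' hf']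
      rw [List.range_succ_eq_map, List.countP_cons, List.countP_map]
      have hmem : (PySem.Set.ofList t).contains q = decide (q ∈ t) := by
        simp [PySem.Set.contains_eq_listContains]
      have hcnt : List.countP
            ((fun (i : Nat) => decide (num * p ^ i ≤ R ∧ L ≤ num * p ^ i ∧ (q + (i : Int)) ∈ t)) ∘ Nat.succ)
            (List.range f)
          = List.countP
            (fun (i : Nat) => decide (num * p * p ^ i ≤ R ∧ L ≤ num * p * p ^ i ∧ ((q + 1) + (i : Int)) ∈ t))
            (List.range f) := by
        apply List.countP_congr
        intro i _
        have e1 : num * p ^ (i + 1) = num * p * p ^ i := by ring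
        have e2 : q + (((i : Int)) + 1) = (q + 1) + (i : Int) := by ring
        simp only [Function.comp_apply, decide_eq_true_eq]
        push_cast
        rw [e1, e2]
      rw [hcnt, hmem]
      simp only [pow_zero, mul_one, Nat.cast_zero, add_zero]
      by_cases hC : L ≤ num ∧ q ∈ t
      · simp [hC, hle]
        omega
      · simp only [hC, if_false, decide_eq_true_eq]
        have hn : ¬ (num ≤ R ∧ L ≤ num ∧ q ∈ t) := by tauto
        simp [hn]
    · rw [if_neg hle]
      have hz : (List.range (f+1)).countP
          (fun (i : Nat) => decide (num * p ^ i ≤ R ∧ L ≤ num * p ^ i ∧ (q + (i : Int)) ∈ t)) = 0 := by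
        rw [List.countP_eq_zero]
        intro i _
        simp only [decide_eq_true_eq]
        rintro ⟨hA, -, -⟩
        have hpi : (1:Int) ≤ p ^ i := one_le_pow₀ (by omega)
        nlinarith
      rw [hz]
      simp

-- B's inner loop with break counts, on an ascending list of bases ≥ 2, the bases with p^e ∈ [L,R]
theorem innerB_eq (L R e : Int) :
    ∀ (l : List Int) (c : Int), (∀ x ∈ l, 2 ≤ x) → l.Pairwise (· < ·) →
      innerB L R e l c =
        c + (l.countP (fun p => decide (p ^ e.toNat ≤ R ∧ L ≤ p ^ e.toNat)) : Int) := by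
  intro l
  induction l with
  | nil => intro c _ _; simp [innerB]
  | cons p rest ih =>
    intro c h2 hpw
    have hp2 : (2:Int) ≤ p := h2 p (by simp)
    have hrest2 : ∀ x ∈ rest, (2:Int) ≤ x := fun x hx => h2 x (by simp [hx])
    have hpwr : rest.Pairwise (· < ·) := hpw.of_cons
    by_cases hbr : R < p ^ e.toNat
    · -- break: every later base gives an even larger power
      have hz : rest.countP (fun x => decide (x ^ e.toNat ≤ R ∧ L ≤ x ^ e.toNat)) = 0 := by
        rw [List.countP_eq_zero]
        intro x hx
        have hlt : p < x := (List.pairwise_cons.mp hpw).1 x hx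
        have : p ^ e.toNat ≤ x ^ e.toNat :=
          pow_le_pow_left₀ (by omega) (le_of_lt hlt) e.toNat
        simp only [decide_eq_true_eq]
        rintro ⟨hxa, -⟩
        omega
      have hph : (decide (p ^ e.toNat ≤ R ∧ L ≤ p ^ e.toNat)) = false := by
        simp only [decide_eq_false_iff_not]
        rintro ⟨hxa, -⟩; omega
      rw [innerB]
      simp only [if_pos hbr]
      rw [List.countP_cons, hz, hph]
      simp
    · have hle : p ^ e.toNat ≤ R := by omega
      rw [innerB]
      simp only [hbr, if_false]
      rw [ih _ hrest2 hpwr]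
      by_cases hL : L ≤ p ^ e.toNat <;> simp [List.countP_cons, hL, hle] <;> omega

-- counting helper: a disjunction that is never simultaneous splits the count
theorem countP_or_disjoint {α : Type} (P Q : α → Prop) [DecidablePred P] [DecidablePred Q] :
    ∀ l : List α, (∀ x ∈ l, ¬(P x ∧ Q x)) →
      l.countP (fun x => decide (P x ∨ Q x)) = l.countP (fun x => decide (P x)) + l.countP (fun x => decide (Q x)) := by
  intro l
  induction l with
  | nil => intro _; simp
  | cons a l ih =>
    intro h
    have ha := h a (by simp)
    have ht := ih (fun x hx => h x (by simp [hx]))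
    simp only [List.countP_cons, Bool.decide_or] at *
    by_cases hP : P a <;> by_cases hQ : Q a <;> simp [hP, hQ] at * <;> omega

-- counting helper: at most one index matches i = j
theorem countP_range_single (j : Nat) (f : Nat → Prop) [DecidablePred f] :
    ∀ n : Nat, (List.range n).countP (fun i => decide (f i ∧ i = j)) =
      if j < n ∧ f j then 1 else 0 := by
  intro n
  induction n with
  | zero => simp
  | succ n ih =>
    rw [List.range_succ, List.countP_append, ih]
    by_cases hj : j < n <;> by_cases hf : f j <;> by_cases hnj : n = j <;>
      simp [hj, hf, hnj] <;> omega

-- per base p: A's count over exponent indices equals the count over the odd sieve primes q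
theorem countA_eq_countB (L R p : Int) (hp : 2 ≤ p) (hR : R ≤ 2147483648) :
    ∀ t : List Int, t.Nodup → (∀ q ∈ t, 3 ≤ q) →
      ((List.range 64).countP
        (fun (i : Nat) => decide (p * p ^ i ≤ R ∧ L ≤ p * p ^ i ∧ ((2 : Int) + (i : Int)) ∈ t))) =
      t.countP (fun q => decide (p ^ Int.toNat (q - 1) ≤ R ∧ L ≤ p ^ Int.toNat (q - 1))) := by
  intro t
  induction t with
  | nil => intro _ _; simp
  | cons q t' ih =>
    intro hnd h3
    have hq3 : (3:Int) ≤ q := h3 q (by simp)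
    have hqn : q ∉ t' := (List.nodup_cons.mp hnd).1
    have hnd' : t'.Nodup := (List.nodup_cons.mp hnd).2
    have h3' : ∀ x ∈ t', (3:Int) ≤ x := fun x hx => h3 x (by simp [hx])
    -- split the membership disjunction
    have hsplit : ((List.range 64).countP
        (fun (i : Nat) => decide (p * p ^ i ≤ R ∧ L ≤ p * p ^ i ∧ ((2 : Int) + (i : Int)) ∈ q :: t'))) =
        ((List.range 64).countP
          (fun (i : Nat) => decide ((p * p ^ i ≤ R ∧ L ≤ p * p ^ i ∧ ((2 : Int) + (i : Int)) = q)
            ∨ (p * p ^ i ≤ R ∧ L ≤ p * p ^ i ∧ ((2 : Int) + (i : Int)) ∈ t')))) := by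
      apply List.countP_congr
      intro i _
      simp only [decide_eq_true_eq, List.mem_cons]
      tauto
    rw [hsplit]
    rw [countP_or_disjoint
        (fun (i : Nat) => p * p ^ i ≤ R ∧ L ≤ p * p ^ i ∧ ((2 : Int) + (i : Int)) = q)
        (fun (i : Nat) => p * p ^ i ≤ R ∧ L ≤ p * p ^ i ∧ ((2 : Int) + (i : Int)) ∈ t')
        (List.range 64)
        (by
          rintro i - ⟨⟨-, -, he⟩, ⟨-, -, hm⟩⟩
          exact hqn (he ▸ hm))]
    have hone : ((List.range 64).countP
        (fun (i : Nat) => decide (p * p ^ i ≤ R ∧ L ≤ p * p ^ i ∧ ((2 : Int) + (i : Int)) = q))) =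
        if p ^ Int.toNat (q - 1) ≤ R ∧ L ≤ p ^ Int.toNat (q - 1) then 1 else 0 := by
      have hcg : ((List.range 64).countP
          (fun (i : Nat) => decide (p * p ^ i ≤ R ∧ L ≤ p * p ^ i ∧ ((2 : Int) + (i : Int)) = q))) =
          ((List.range 64).countP
            (fun (i : Nat) => decide ((p * p ^ i ≤ R ∧ L ≤ p * p ^ i) ∧ i = Int.toNat (q - 2)))) := by
        apply List.countP_congr
        intro i _
        simp only [decide_eq_true_eq]
        constructor
        · rintro ⟨h1, h2, h3⟩; exact ⟨⟨h1, h2⟩, by omega⟩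
        · rintro ⟨⟨h1, h2⟩, h3⟩; exact ⟨h1, h2, by omega⟩
      rw [hcg, countP_range_single (Int.toNat (q - 2)) (fun i => p * p ^ i ≤ R ∧ L ≤ p * p ^ i) 64]
      -- identify exponents: with j = (q-2).toNat and k = (q-1).toNat, k = j + 1 and p * p^j = p^k
      have hk : Int.toNat (q - 1) = Int.toNat (q - 2) + 1 := by omega
      have hpe : p * p ^ (Int.toNat (q - 2)) = p ^ Int.toNat (q - 1) := by
        rw [hk, pow_succ]
        ring
      by_cases hB : p ^ Int.toNat (q - 1) ≤ R ∧ L ≤ p ^ Int.toNat (q - 1)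
      · -- bounds hold; the index is small because p^k ≤ R ≤ 2^31
        have hk31 : Int.toNat (q - 1) ≤ 31 := by
          by_contra hgt
          have h32 : (2:Int) ^ 32 ≤ 2 ^ Int.toNat (q - 1) :=
            pow_le_pow_right₀ (by norm_num) (by omega)
          have hbase : (2:Int) ^ Int.toNat (q - 1) ≤ p ^ Int.toNat (q - 1) :=
            pow_le_pow_left₀ (by norm_num) hp _
          have : ((4294967296:Int)) ≤ R := by
            calc (4294967296:Int) = 2 ^ 32 := by norm_num
            _ ≤ 2 ^ Int.toNat (q - 1) := h32
            _ ≤ p ^ Int.toNat (q - 1) := hbase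
            _ ≤ R := hB.1
          omega
        rw [if_pos ⟨by omega, by rw [hpe]; exact ⟨hB.1, hB.2⟩⟩, if_pos hB]
      · rw [if_neg, if_neg hB]
        rintro ⟨-, hA1, hA2⟩
        rw [hpe] at hA1 hA2
        exact hB ⟨hA1, hA2⟩
    rw [hone, ih hnd' h3', List.countP_cons]
    simp only [decide_eq_true_eq]
    by_cases hB : p ^ Int.toNat (q - 1) ≤ R ∧ L ≤ p ^ Int.toNat (q - 1) <;> simp [hB] <;> omega

-- double-sum interchange for list sums of integers
theorem list_sum_swap {α β : Type} (g : α → β → Int) :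
    ∀ (l1 : List α) (l2 : List β),
      (l1.map (fun a => (l2.map (fun b => g a b)).sum)).sum =
      (l2.map (fun b => (l1.map (fun a => g a b)).sum)).sum := by
  intro l1
  induction l1 with
  | nil => intro l2; simp
  | cons a l ih =>
    intro l2
    simp only [List.map_cons, List.sum_cons, ih]
    rw [← List.sum_map_add]

-- the two programs agree (Pre_ is only needed for the Python side, where isqrt raises on R < 0)
theorem solution_eq_alt (L R : Int) (hdom : Dom_solution L R) :
    solution L R = solution_alt L R := by
  have hRle : R ≤ 2147483648 := by
    unfold Dom_solution pvDomInt at hdom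
    simp only [Bool.and_eq_true, decide_eq_true_eq] at hdom
    exact hdom.2.2
  unfold solution solution_alt
  dsimp only
  rw [PySem.List.slice_from_one]
  set n := isqrtI R + 1 with hn
  set ps := sieve_eratosthenes n with hps
  have h2 := sieve_mem_two_le n
  have hpw := sieve_pairwise n
  have h3 := sieve_tail_three_le n
  have hpwt : ps.tail.Pairwise (· < ·) := hpw.sublist (List.tail_sublist ps)
  have hnd : ps.tail.Nodup := hpwt.imp (fun hx => ne_of_lt hx)
  -- A side: the while loop becomes a count over exponent indices
  have hA : ps.foldl (fun c p => innerA L R p (PySem.Set.ofList ps.tail) 64 2 p c) 0 =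
      (ps.map (fun p => (((List.range 64).countP
        (fun (i : Nat) => decide (p * p ^ i ≤ R ∧ L ≤ p * p ^ i ∧ ((2:Int) + (i : Int)) ∈ ps.tail))) : Int))).sum := by
    rw [PySem.List.foldl_congr_mem ps _
      (fun c p => c + (((List.range 64).countP
        (fun (i : Nat) => decide (p * p ^ i ≤ R ∧ L ≤ p * p ^ i ∧ ((2:Int) + (i : Int)) ∈ ps.tail))) : Int)) 0
      (by
        intro c p hp
        have hp2 : (2:Int) ≤ p := h2 p hp
        refine innerA_eq L R p ps.tail hp2 64 2 p c (by omega) ?_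
        have h264 : (0:Int) < 2 ^ 64 := by positivity
        calc R ≤ 2147483648 := hRle
          _ < 2 * 2 ^ 64 := by norm_num
          _ ≤ p * 2 ^ 64 := mul_le_mul_of_nonneg_right hp2 h264.le)]
    rw [PySem.List.foldl_add]
    simp
  rw [hA]
  -- per base, the exponent-index count equals the count over the odd sieve primes
  rw [List.map_congr_left (fun p hp =>
    congrArg (fun (k : Nat) => (k : Int))
      (countA_eq_countB L R p (h2 p hp) hRle ps.tail hnd h3))]
  -- B side: the break loop becomes a count over bases
  have hB : ps.tail.foldl (fun c q => innerB L R (q - 1) ps c) 0 =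
      (ps.tail.map (fun q => ((ps.countP
        (fun p => decide (p ^ (q-1).toNat ≤ R ∧ L ≤ p ^ (q-1).toNat))) : Int))).sum := by
    rw [PySem.List.foldl_congr_mem ps.tail _
      (fun c q => c + ((ps.countP
        (fun p => decide (p ^ (q-1).toNat ≤ R ∧ L ≤ p ^ (q-1).toNat))) : Int)) 0
      (by
        intro c q hq
        exact innerB_eq L R (q - 1) ps c h2 hpw)]
    rw [PySem.List.foldl_add]
    simp
  rw [hB]
  -- interchange the two summations
  have e1 : (ps.map (fun p => ((ps.tail.countP
      (fun q => decide (p ^ Int.toNat (q - 1) ≤ R ∧ L ≤ p ^ Int.toNat (q - 1)))) : Int))).sum =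
      (ps.map (fun p => (ps.tail.map (fun q =>
        if decide (p ^ Int.toNat (q - 1) ≤ R ∧ L ≤ p ^ Int.toNat (q - 1)) then (1:Int) else 0)).sum)).sum := by
    apply congrArg
    apply List.map_congr_left
    intro p _
    rw [PySem.List.sum_map_ite_one_zero]
  rw [e1, list_sum_swap (fun p q =>
      if decide (p ^ Int.toNat (q - 1) ≤ R ∧ L ≤ p ^ Int.toNat (q - 1)) then (1:Int) else 0) ps ps.tail]
  apply congrArg
  apply List.map_congr_left
  intro q _
  rw [PySem.List.sum_map_ite_one_zero]

-- ===== VERDICT (by name: the statement is the Claim_ definition above) =====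
theorem solution_spec : Claim_equal_solution := by
  intro L R hdom _hpre
  unfold Spec_solution
  exact solution_eq_alt L R hdom
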